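-- pv_equiv track=rewrite | github.com/ia-corydean/blitzy-requirements | shared-infrastructure/intelligence-engines/requirement-similarity.py | _is_workflow_sequence
-- ===== SOURCE A (Python) =====
-- from typing import Dict, List, Tuple, Optional, Set
--
-- def _is_workflow_sequence(workflow_types: List[str]) -> bool:
--     """Check if workflows form a sequence"""
--     if not all(workflow_types):
--         return False
--
--     # Known sequences
--     known_sequences = [
--         ['quote_creation', 'quote_binding', 'policy_issuance'],
--         ['driver_collection', 'vehicle_collection', 'rate_calculation'],
--         ['policy_update', 'endorsement_creation', 'billing_adjustment']
--     ]
--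
--     for sequence in known_sequences:
--         if all(wf in sequence for wf in workflow_types):
--             # Check if in order
--             indices = [sequence.index(wf) for wf in workflow_types]
--             if indices == sorted(indices):
--                 return True
--
--     return False
-- ===== SOURCE B (Python) =====
-- _WORKFLOW_INDEX = {
--     'quote_creation': (0, 0), 'quote_binding': (0, 1), 'policy_issuance': (0, 2),
--     'driver_collection': (1, 0), 'vehicle_collection': (1, 1), 'rate_calculation': (1, 2),
--     'policy_update': (2, 0), 'endorsement_creation': (2, 1), 'billing_adjustment': (2, 2),
-- }
--
-- def _is_workflow_sequence(workflow_types):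
--     seq_id = None
--     last_pos = -1
--     for wf in workflow_types:
--         entry = _WORKFLOW_INDEX.get(wf)
--         if entry is None:
--             return False
--         sid, pos = entry
--         if seq_id is None:
--             seq_id = sid
--         elif sid != seq_id:
--             return False
--         if pos < last_pos:
--             return False
--         last_pos = pos
--     return True
-- ===== Notes on version B (the rewrite author's own statement) =====
-- stated objective: alternative
-- what changed: Replaces the outer loop over three candidate sequences (each doing a membership scan, an index-building pass and a sort) with one precomputed name->(sequence_id,position) dict and a single pass checking a common sequence id and a running-max position; the empty-string guard becomes redundant because empty strings miss the dict.
import Mathlib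
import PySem

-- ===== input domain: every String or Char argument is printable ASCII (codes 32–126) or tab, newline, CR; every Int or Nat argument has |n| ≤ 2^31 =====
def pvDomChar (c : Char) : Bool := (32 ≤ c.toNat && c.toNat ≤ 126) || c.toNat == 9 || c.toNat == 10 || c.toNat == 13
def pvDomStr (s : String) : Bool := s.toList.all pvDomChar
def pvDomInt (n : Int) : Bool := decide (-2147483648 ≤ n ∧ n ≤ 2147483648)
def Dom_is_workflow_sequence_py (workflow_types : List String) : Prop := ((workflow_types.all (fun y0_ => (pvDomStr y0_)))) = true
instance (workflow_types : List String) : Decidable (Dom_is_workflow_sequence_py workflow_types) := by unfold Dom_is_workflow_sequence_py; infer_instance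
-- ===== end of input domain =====

-- B replaces A's loop over three candidate sequences (membership scan + index list + sort each)
-- with one precomputed name -> (sequence_id, position) table and a single pass keeping a running max.

-- ===== PORT A =====
def pvKnownSequences : List (List String) :=
  [["quote_creation", "quote_binding", "policy_issuance"],
   ["driver_collection", "vehicle_collection", "rate_calculation"],
   ["policy_update", "endorsement_creation", "billing_adjustment"]]

-- the `for sequence in known_sequences` loop, with its early `return True`
def pvALoop (workflow_types : List String) : List (List String) → Bool
  | [] => false
  | seq :: rest =>
    if workflow_types.all (fun wf => seq.contains wf) then
      -- membership was just checked, so index? never misses; the getD default is unreachable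
      let indices : List Int :=
        workflow_types.map (fun wf => ((PySem.List.index? seq wf).getD 0 : Nat))
      if indices = PySem.List.sorted indices (fun x => x) false then true
      else pvALoop workflow_types rest
    else pvALoop workflow_types rest

def is_workflow_sequence_py (workflow_types : List String) : Bool :=
  if !(workflow_types.all (fun s => decide (s ≠ ""))) then false
  else pvALoop workflow_types pvKnownSequences

-- ===== PORT B =====
def pvTable : PySem.Dict String (Int × Int) := PySem.Dict.ofList
  [("quote_creation", (0, 0)), ("quote_binding", (0, 1)), ("policy_issuance", (0, 2)),
   ("driver_collection", (1, 0)), ("vehicle_collection", (1, 1)), ("rate_calculation", (1, 2)),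
   ("policy_update", (2, 0)), ("endorsement_creation", (2, 1)), ("billing_adjustment", (2, 2))]

-- the single pass; state = (seq_id : Option Int, last_pos : Int)
def pvBLoop : List String → Option Int → Int → Bool
  | [], _, _ => true
  | wf :: rest, seqId, lastPos =>
    match PySem.Dict.get? pvTable wf with
    | none => false
    | some (sid, pos) =>
      match seqId with
      | none => if pos < lastPos then false else pvBLoop rest (some sid) pos
      | some s0 =>
        if sid ≠ s0 then false
        else if pos < lastPos then false
        else pvBLoop rest (some s0) pos

def is_workflow_sequence_py_alt (workflow_types : List String) : Bool :=
  pvBLoop workflow_types none (-1)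

-- ===== PRECONDITION & SPEC =====
def Spec_is_workflow_sequence_py (workflow_types : List String) (out : Bool) : Prop := out = is_workflow_sequence_py_alt workflow_types
instance (workflow_types : List String) (out : Bool) : Decidable (Spec_is_workflow_sequence_py workflow_types out) := by unfold Spec_is_workflow_sequence_py; infer_instance

-- ===== CLAIM (what is proved, stated in full; the proofs are below) =====
def Claim_equal_is_workflow_sequence_py : Prop := ∀ (workflow_types : List String), Dom_is_workflow_sequence_py workflow_types → Spec_is_workflow_sequence_py workflow_types (is_workflow_sequence_py workflow_types)

-- ===== LEMMAS AND PROOFS =====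

def pvLook (w : String) : Option (Int × Int) :=
  if w = "quote_creation" then some (0, 0)
  else if w = "quote_binding" then some (0, 1)
  else if w = "policy_issuance" then some (0, 2)
  else if w = "driver_collection" then some (1, 0)
  else if w = "vehicle_collection" then some (1, 1)
  else if w = "rate_calculation" then some (1, 2)
  else if w = "policy_update" then some (2, 0)
  else if w = "endorsement_creation" then some (2, 1)
  else if w = "billing_adjustment" then some (2, 2)
  else none
lemma pv_classify (w : String) : PySem.Dict.get? pvTable w = pvLook w := by
  simp only [pvTable, PySem.Dict.ofList, PySem.Dict.update, List.foldl,
    PySem.Dict.get?_insert, PySem.Dict.get?_empty, pvLook]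
  split_ifs <;> simp_all
def pvR (a b : Int × Int) : Prop := a.1 = b.1 ∧ a.2 ≤ b.2
lemma pv_look_nonneg {w : String} {s p : Int} (h : pvLook w = some (s, p)) : 0 ≤ p := by
  unfold pvLook at h; split_ifs at h <;> simp_all <;> omega
lemma pv_chainR_cons (s p : Int) (L : List (Int × Int)) :
    List.IsChain pvR ((s, p) :: L) ↔
      (∀ x ∈ L, x.1 = s) ∧ List.IsChain (· ≤ ·) (p :: L.map Prod.snd) := by
  induction L generalizing s p with
  | nil => simp
  | cons b L ih =>
    obtain ⟨s', p'⟩ := b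
    simp only [List.isChain_cons_cons, ih, List.map_cons, List.mem_cons, pvR]
    constructor
    · rintro ⟨⟨h1, h2⟩, h3, h4⟩
      subst h1
      exact ⟨fun x hx => by rcases hx with rfl | hx; rfl; exact h3 x hx, h2, h4⟩
    · rintro ⟨h3, h2, h4⟩
      have hs : s' = s := h3 (s', p') (Or.inl rfl)
      subst hs
      exact ⟨⟨rfl, h2⟩, fun x hx => h3 x (Or.inr hx), h4⟩
lemma pv_bloop_some (wts : List String) : ∀ (s last : Int),
    pvBLoop wts (some s) last = true ↔
      ∃ L, wts.mapM pvLook = some L ∧ (∀ x ∈ L, x.1 = s) ∧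
        List.IsChain (· ≤ ·) (last :: L.map Prod.snd) := by
  induction wts with
  | nil => intro s last; simp [pvBLoop]
  | cons w rest ih =>
    intro s last
    simp only [pvBLoop, pv_classify w]
    cases h : pvLook w with
    | none => simp [List.mapM_cons, h]
    | some v =>
      obtain ⟨sid, pos⟩ := v
      simp only [List.mapM_cons, h, Option.bind_eq_bind, Option.bind_some]
      by_cases hs : sid = s
      · subst hs
        by_cases hp : pos < last
        · simp only [hp, if_true, ne_eq, not_true_eq_false, ite_self]
          constructor
          · intro hf; cases hf
          · rintro ⟨L, hL, hall, hch⟩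
            -- L = (sid,pos) :: L', chain forces last ≤ pos
            rcases hmap : rest.mapM pvLook with _ | L'
            · rw [hmap] at hL; simp at hL
            · rw [hmap] at hL; simp at hL
              subst hL
              simp [List.isChain_cons_cons] at hch
              omega
        · simp only [ne_eq, not_true_eq_false, if_false, hp]
          rw [ih sid pos]
          constructor
          · rintro ⟨L', hL', hall, hch⟩
            refine ⟨(sid, pos) :: L', by simp [hL'], ?_, ?_⟩
            · intro x hx; rcases List.mem_cons.mp hx with rfl | hx; rfl; exact hall x hx
            · simp only [List.map_cons, List.isChain_cons_cons]; exact ⟨by omega, hch⟩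
          · rintro ⟨L, hL, hall, hch⟩
            rcases hmap : rest.mapM pvLook with _ | L'
            · rw [hmap] at hL; simp at hL
            · rw [hmap] at hL; simp at hL; subst hL
              refine ⟨L', rfl, fun x hx => hall x (List.mem_cons_of_mem _ hx), ?_⟩
              simp only [List.map_cons, List.isChain_cons_cons] at hch
              exact hch.2
      · simp only [ne_eq, hs, not_false_eq_true, if_true]
        constructor
        · intro hf; cases hf
        · rintro ⟨L, hL, hall, _⟩
          rcases hmap : rest.mapM pvLook with _ | L'
          · rw [hmap] at hL; simp at hL
          · rw [hmap] at hL; simp at hL; subst hL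
            exact absurd (hall (sid, pos) List.mem_cons_self) hs

lemma pv_look_range {w : String} {s p : Int} (h : pvLook w = some (s, p)) :
    s = 0 ∨ s = 1 ∨ s = 2 := by
  unfold pvLook at h; split_ifs at h <;> simp_all
lemma pv_look_ne_empty {w : String} {v : Int × Int} (h : pvLook w = some v) : w ≠ "" := by
  unfold pvLook at h; split_ifs at h <;> simp_all

def pvSeq0 : List String := ["quote_creation", "quote_binding", "policy_issuance"]
def pvSeq1 : List String := ["driver_collection", "vehicle_collection", "rate_calculation"]
def pvSeq2 : List String := ["policy_update", "endorsement_creation", "billing_adjustment"]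

lemma pv_elem0 (w : String) : pvSeq0.contains w = true ↔ ∃ p, pvLook w = some (0, p) := by
  unfold pvSeq0 pvLook; split_ifs <;> simp_all
lemma pv_elem1 (w : String) : pvSeq1.contains w = true ↔ ∃ p, pvLook w = some (1, p) := by
  unfold pvSeq1 pvLook; split_ifs <;> simp_all
lemma pv_elem2 (w : String) : pvSeq2.contains w = true ↔ ∃ p, pvLook w = some (2, p) := by
  unfold pvSeq2 pvLook; split_ifs <;> simp_all

lemma pv_idx0 {w : String} {p : Int} (h : pvLook w = some (0, p)) :
    (((PySem.List.index? pvSeq0 w).getD 0 : Nat) : Int) = p := by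
  unfold pvLook at h; split_ifs at h <;> simp_all <;> subst_vars <;> decide
lemma pv_idx1 {w : String} {p : Int} (h : pvLook w = some (1, p)) :
    (((PySem.List.index? pvSeq1 w).getD 0 : Nat) : Int) = p := by
  unfold pvLook at h; split_ifs at h <;> simp_all <;> subst_vars <;> decide
lemma pv_idx2 {w : String} {p : Int} (h : pvLook w = some (2, p)) :
    (((PySem.List.index? pvSeq2 w).getD 0 : Nat) : Int) = p := by
  unfold pvLook at h; split_ifs at h <;> simp_all <;> subst_vars <;> decide

lemma pv_allmem_gen (seq : List String) (k : Int)
    (helem : ∀ w, seq.contains w = true ↔ ∃ p, pvLook w = some (k, p)) :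
    ∀ wts : List String, (wts.all (fun wf => seq.contains wf) = true) ↔
      ∃ L, wts.mapM pvLook = some L ∧ ∀ x ∈ L, x.1 = k := by
  intro wts
  induction wts with
  | nil => simp
  | cons w rest ih =>
    simp only [List.all_cons, Bool.and_eq_true, ih, helem w, List.mapM_cons,
      Option.bind_eq_bind]
    constructor
    · rintro ⟨⟨p, hp⟩, L, hL, hall⟩
      refine ⟨(k, p) :: L, by simp [hp, hL], ?_⟩
      intro x hx; rcases List.mem_cons.mp hx with rfl | hx; rfl; exact hall x hx
    · rintro ⟨L, hL, hall⟩
      cases h : pvLook w with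
      | none => rw [h] at hL; simp at hL
      | some v =>
        rw [h] at hL
        rcases hmap : rest.mapM pvLook with _ | L'
        · rw [hmap] at hL; simp at hL
        · rw [hmap] at hL; simp at hL; subst hL
          obtain ⟨s, p⟩ := v
          have hk : s = k := hall (s, p) List.mem_cons_self
          subst hk
          exact ⟨⟨p, rfl⟩, L', rfl, fun x hx => hall x (List.mem_cons_of_mem _ hx)⟩

lemma pv_map_idx_gen (seq : List String) (k : Int)
    (hidx : ∀ {w : String} {p : Int}, pvLook w = some (k, p) →
      (((PySem.List.index? seq w).getD 0 : Nat) : Int) = p) :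
    ∀ (wts : List String) (L : List (Int × Int)), wts.mapM pvLook = some L →
      (∀ x ∈ L, x.1 = k) →
      wts.map (fun wf => (((PySem.List.index? seq wf).getD 0 : Nat) : Int)) = L.map Prod.snd := by
  intro wts
  induction wts with
  | nil => intro L hL _; simp at hL; subst hL; rfl
  | cons w rest ih =>
    intro L hL hall
    simp only [List.mapM_cons, Option.bind_eq_bind] at hL
    cases h : pvLook w with
    | none => rw [h] at hL; simp at hL
    | some v =>
      rw [h] at hL
      rcases hmap : rest.mapM pvLook with _ | L'
      · rw [hmap] at hL; simp at hL
      · rw [hmap] at hL; simp at hL; subst hL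
        obtain ⟨s, p⟩ := v
        have hk : s = k := hall (s, p) List.mem_cons_self
        subst hk
        simp only [List.map_cons]
        rw [ih L' hmap (fun x hx => hall x (List.mem_cons_of_mem _ hx)), hidx h]

lemma pv_sorted_iff (l : List Int) :
    (l = PySem.List.sorted l (fun x => x) false) ↔ List.IsChain (· ≤ ·) l := by
  constructor
  · intro h
    rw [List.isChain_iff_pairwise]
    have := PySem.List.sorted_pairwise (xs := l) (key := fun x => x)
    rw [← h] at this
    exact this
  · intro h
    have hp : List.Pairwise (fun a b : Int => a ≤ b) l := List.isChain_iff_pairwise.mp h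
    exact (PySem.List.sorted_eq_self_of_pairwise l (fun x => x) hp).symm

lemma pv_chainR_of_all (k : Int) (L : List (Int × Int)) (hall : ∀ x ∈ L, x.1 = k) :
    List.IsChain pvR L ↔ List.IsChain (· ≤ ·) (L.map Prod.snd) := by
  cases L with
  | nil => simp
  | cons a L =>
    obtain ⟨s, p⟩ := a
    rw [pv_chainR_cons]
    have hs : s = k := hall (s, p) List.mem_cons_self
    subst hs
    simp only [List.map_cons]
    constructor
    · rintro ⟨_, h⟩; exact h
    · intro h; exact ⟨fun x hx => (hall x (List.mem_cons_of_mem _ hx)).trans rfl, h⟩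

lemma pv_mapM_some_nil {wts : List String} (h : wts.mapM pvLook = some []) : wts = [] := by
  cases wts with
  | nil => rfl
  | cons w rest =>
    simp only [List.mapM_cons, Option.bind_eq_bind] at h
    cases hw : pvLook w with
    | none => rw [hw] at h; simp at h
    | some v =>
      rw [hw] at h
      rcases hmap : rest.mapM pvLook with _ | L'
      · rw [hmap] at h; simp at h
      · rw [hmap] at h; simp at h

lemma pv_mapM_some_mem : ∀ {wts : List String} {L : List (Int × Int)},
    wts.mapM pvLook = some L → ∀ w ∈ wts, ∃ v, pvLook w = some v := by
  intro wts
  induction wts with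
  | nil => intro L _ w hw; cases hw
  | cons w' rest ih =>
    intro L hL w hw
    simp only [List.mapM_cons, Option.bind_eq_bind] at hL
    cases h : pvLook w' with
    | none => rw [h] at hL; simp at hL
    | some v =>
      rw [h] at hL
      rcases hmap : rest.mapM pvLook with _ | L'
      · rw [hmap] at hL; simp at hL
      · rcases List.mem_cons.mp hw with rfl | hw
        · exact ⟨v, h⟩
        · exact ih hmap w hw

lemma pv_mapM_mem_look : ∀ {wts : List String} {L : List (Int × Int)},
    wts.mapM pvLook = some L → ∀ v ∈ L, ∃ w, pvLook w = some v := by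
  intro wts
  induction wts with
  | nil => intro L hL v hv; simp at hL; subst hL; cases hv
  | cons w' rest ih =>
    intro L hL v hv
    simp only [List.mapM_cons, Option.bind_eq_bind] at hL
    cases h : pvLook w' with
    | none => rw [h] at hL; simp at hL
    | some v' =>
      rw [h] at hL
      rcases hmap : rest.mapM pvLook with _ | L'
      · rw [hmap] at hL; simp at hL
      · rw [hmap] at hL; simp at hL; subst hL
        rcases List.mem_cons.mp hv with rfl | hv
        · exact ⟨w', h⟩
        · exact ih hmap v hv

lemma pv_check_gen (seq : List String) (k : Int)
    (helem : ∀ w, seq.contains w = true ↔ ∃ p, pvLook w = some (k, p))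
    (hidx : ∀ {w : String} {p : Int}, pvLook w = some (k, p) →
      (((PySem.List.index? seq w).getD 0 : Nat) : Int) = p)
    (wts : List String) :
    ((wts.all (fun wf => seq.contains wf)) = true ∧
      wts.map (fun wf => (((PySem.List.index? seq wf).getD 0 : Nat) : Int)) =
        PySem.List.sorted (wts.map (fun wf => (((PySem.List.index? seq wf).getD 0 : Nat) : Int))) (fun x => x) false)
    ↔ ∃ L, wts.mapM pvLook = some L ∧ (∀ x ∈ L, x.1 = k) ∧
        List.IsChain (· ≤ ·) (L.map Prod.snd) := by
  constructor
  · rintro ⟨hall, hsort⟩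
    obtain ⟨L, hL, hfst⟩ := (pv_allmem_gen seq k helem wts).mp hall
    have hmapeq := pv_map_idx_gen seq k (fun {w p} => hidx) wts L hL hfst
    have hch := (pv_sorted_iff _).mp hsort
    rw [hmapeq] at hch
    exact ⟨L, hL, hfst, hch⟩
  · rintro ⟨L, hL, hfst, hch⟩
    have hall := (pv_allmem_gen seq k helem wts).mpr ⟨L, hL, hfst⟩
    have hmapeq := pv_map_idx_gen seq k (fun {w p} => hidx) wts L hL hfst
    refine ⟨hall, (pv_sorted_iff _).mpr ?_⟩
    rw [hmapeq]
    exact hch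

def pvMid (wts : List String) : Prop :=
  ∃ L, wts.mapM pvLook = some L ∧ List.IsChain pvR L

lemma pv_B_iff (wts : List String) : is_workflow_sequence_py_alt wts = true ↔ pvMid wts := by
  unfold is_workflow_sequence_py_alt pvMid
  cases wts with
  | nil => simp [pvBLoop]
  | cons w rest =>
    simp only [pvBLoop, pv_classify w]
    cases h : pvLook w with
    | none => simp [List.mapM_cons, h]
    | some v =>
      obtain ⟨s, p⟩ := v
      have hp0 : 0 ≤ p := pv_look_nonneg h
      change (if p < -1 then false else pvBLoop rest (some s) p) = true ↔ _
      rw [if_neg (by omega)]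
      rw [pv_bloop_some]
      simp only [List.mapM_cons, h, Option.bind_eq_bind, Option.bind_some]
      constructor
      · rintro ⟨L', hL', hall, hch⟩
        refine ⟨(s, p) :: L', by simp [hL'], ?_⟩
        rw [pv_chainR_cons]
        exact ⟨hall, hch⟩
      · rintro ⟨L, hL, hch⟩
        rcases hmap : rest.mapM pvLook with _ | L'
        · rw [hmap] at hL; simp at hL
        · rw [hmap] at hL; simp at hL; subst hL
          rw [pv_chainR_cons] at hch
          exact ⟨L', rfl, hch.1, hch.2⟩

def pvCheck (seq : List String) (wts : List String) : Prop :=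
  (wts.all (fun wf => seq.contains wf)) = true ∧
    wts.map (fun wf => (((PySem.List.index? seq wf).getD 0 : Nat) : Int)) =
      PySem.List.sorted (wts.map (fun wf => (((PySem.List.index? seq wf).getD 0 : Nat) : Int))) (fun x => x) false

lemma pvALoop_cons (wts seq : List String) (rest : List (List String)) :
    (pvALoop wts (seq :: rest) = true) ↔ (pvCheck seq wts ∨ pvALoop wts rest = true) := by
  unfold pvCheck
  simp only [pvALoop]
  split_ifs with h1 h2
  · exact iff_of_true rfl (Or.inl ⟨h1, h2⟩)
  · constructor
    · exact Or.inr
    · rintro (⟨_, hc⟩ | h)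
      · exact absurd hc h2
      · exact h
  · constructor
    · exact Or.inr
    · rintro (⟨hc, _⟩ | h)
      · exact absurd hc h1
      · exact h

lemma pv_Aloop_iff (wts : List String) :
    pvALoop wts pvKnownSequences = true ↔
      pvCheck pvSeq0 wts ∨ pvCheck pvSeq1 wts ∨ pvCheck pvSeq2 wts := by
  have : pvKnownSequences = [pvSeq0, pvSeq1, pvSeq2] := rfl
  rw [this, pvALoop_cons, pvALoop_cons, pvALoop_cons]
  simp [pvALoop]

lemma pv_A_iff (wts : List String) : is_workflow_sequence_py wts = true ↔ pvMid wts := by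
  unfold is_workflow_sequence_py
  by_cases hg : (wts.all (fun s => decide (s ≠ ""))) = true
  · simp only [hg, Bool.not_true, Bool.false_eq_true, if_false, pv_Aloop_iff]
    constructor
    · rintro (h | h | h)
      · obtain ⟨L, hL, hfst, hch⟩ := (pv_check_gen pvSeq0 0 pv_elem0 (fun {w p} => pv_idx0) wts).mp h
        exact ⟨L, hL, (pv_chainR_of_all 0 L hfst).mpr hch⟩
      · obtain ⟨L, hL, hfst, hch⟩ := (pv_check_gen pvSeq1 1 pv_elem1 (fun {w p} => pv_idx1) wts).mp h
        exact ⟨L, hL, (pv_chainR_of_all 1 L hfst).mpr hch⟩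
      · obtain ⟨L, hL, hfst, hch⟩ := (pv_check_gen pvSeq2 2 pv_elem2 (fun {w p} => pv_idx2) wts).mp h
        exact ⟨L, hL, (pv_chainR_of_all 2 L hfst).mpr hch⟩
    · rintro ⟨L, hL, hch⟩
      cases L with
      | nil =>
        have : wts = [] := pv_mapM_some_nil hL
        subst this
        left
        refine ⟨rfl, ?_⟩
        exact (pv_sorted_iff []).mpr (by simp)
      | cons a L' =>
        obtain ⟨s, p⟩ := a
        have hfst' : ∀ x ∈ L', x.1 = s := ((pv_chainR_cons s p L').mp hch).1
        have hfst : ∀ x ∈ ((s, p) :: L'), x.1 = s := by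
          intro x hx; rcases List.mem_cons.mp hx with rfl | hx; rfl; exact hfst' x hx
        have hchle : List.IsChain (· ≤ ·) (((s, p) :: L').map Prod.snd) :=
          (pv_chainR_of_all s _ hfst).mp hch
        obtain ⟨w, hw⟩ := pv_mapM_mem_look hL (s, p) List.mem_cons_self
        rcases pv_look_range hw with rfl | rfl | rfl
        · exact Or.inl ((pv_check_gen pvSeq0 0 pv_elem0 (fun {w p} => pv_idx0) wts).mpr ⟨_, hL, hfst, hchle⟩)
        · exact Or.inr (Or.inl ((pv_check_gen pvSeq1 1 pv_elem1 (fun {w p} => pv_idx1) wts).mpr ⟨_, hL, hfst, hchle⟩))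
        · exact Or.inr (Or.inr ((pv_check_gen pvSeq2 2 pv_elem2 (fun {w p} => pv_idx2) wts).mpr ⟨_, hL, hfst, hchle⟩))
  · simp only [Bool.not_eq_true] at hg
    simp only [hg, Bool.not_false, if_true]
    constructor
    · intro h; cases h
    · rintro ⟨L, hL, _⟩
      exfalso
      rw [Bool.eq_false_iff, ne_eq, List.all_eq_true] at hg
      apply hg
      intro w hw
      obtain ⟨v, hv⟩ := pv_mapM_some_mem hL w hw
      simpa using pv_look_ne_empty hv


-- ===== VERDICT (by name: the statement is the Claim_ definition above) =====
theorem is_workflow_sequence_py_spec : Claim_equal_is_workflow_sequence_py := by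
  intro wts _
  unfold Spec_is_workflow_sequence_py
  have h := (pv_A_iff wts).trans (pv_B_iff wts).symm
  cases hA : is_workflow_sequence_py wts <;> cases hB : is_workflow_sequence_py_alt wts <;> simp_all
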